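-- pv_equiv track=rewrite | github.com/camiloricoe/python-camilo | CodeSignal/Arcade/The Core/31-Increase Number Roundness.py | solution
-- ===== SOURCE A (Python) =====
-- def solution(n):
--     n = str(n)
--     if n.count("0") == 0:
--         return False
--     i = n.index("0")
--     while i < len(n)-1:
--         if n[i+1] != "0":
--             return True
--         i += 1
--
--     return False
-- ===== SOURCE B (Python) =====
-- def solution(n):
--     return "0" in str(n).rstrip("0")
-- ===== Notes on version B (the rewrite author's own statement) =====
-- stated objective: simpler
-- what changed: A finds the first '0' and forward-scans for a following nonzero character; B instead strips trailing '0' characters and tests whether a '0' remains, a one-line membership test.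
import Mathlib
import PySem

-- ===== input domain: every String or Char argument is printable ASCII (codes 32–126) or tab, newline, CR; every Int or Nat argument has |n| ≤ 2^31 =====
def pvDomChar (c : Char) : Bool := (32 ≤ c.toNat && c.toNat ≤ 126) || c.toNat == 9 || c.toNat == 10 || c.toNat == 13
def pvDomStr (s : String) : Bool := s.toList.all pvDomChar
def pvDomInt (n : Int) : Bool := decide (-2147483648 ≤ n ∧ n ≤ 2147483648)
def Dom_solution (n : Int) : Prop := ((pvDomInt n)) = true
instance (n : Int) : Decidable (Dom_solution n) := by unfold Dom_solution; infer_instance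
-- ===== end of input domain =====

-- B strips trailing '0' characters and tests whether a '0' remains, instead of A's
-- find-first-zero-then-forward-scan; same return value, no speed claim.

-- ===== PORT A =====
-- the while loop 'while i < len(n)-1: if n[i+1] != "0": return True; i += 1'
def solutionLoop (cs : List Char) (i : Nat) : Bool :=
  if i < cs.length - 1 then
    if PySem.List.pyGetD cs ((i : Int) + 1) ' ' ≠ '0' then true
    else solutionLoop cs (i + 1)
  else false
termination_by cs.length - 1 - i
decreasing_by omega

def solution (n : Int) : Bool :=
  let s := PySem.Int.toStr n
  if PySem.Str.count s "0" == 0 then false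
  else
    -- n.index("0"): guarded by the count check, so find never returns -1 here
    solutionLoop s.toList (PySem.Str.find s "0").toNat

-- ===== PORT B =====
def solution_alt (n : Int) : Bool :=
  let s := PySem.Int.toStr n
  -- s.rstrip("0") ported by hand (PySem has no rstrip-with-chars): drop the trailing run of '0' chars; exact
  let stripped := (s.toList.reverse.dropWhile (· == '0')).reverse
  PySem.Chars.isIn ['0'] stripped

-- ===== PRECONDITION & SPEC =====
def Spec_solution (n : Int) (out : Bool) : Prop := out = solution_alt n
instance (n : Int) (out : Bool) : Decidable (Spec_solution n out) := by unfold Spec_solution; infer_instance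

-- ===== CLAIM (what is proved, stated in full; the proofs are below) =====
def Claim_equal_solution : Prop := ∀ (n : Int), Dom_solution n → Spec_solution n (solution n)

-- ===== LEMMAS AND PROOFS =====

-- "some '0' occurs strictly before some non-'0'"
def HasZeroThenNonzero (cs : List Char) : Prop :=
  ∃ u v, cs = u ++ v ∧ '0' ∈ u ∧ ∃ c ∈ v, c ≠ '0'

-- singleton infix is membership
theorem singleton_infix_iff (a : Char) (l : List Char) : [a] <:+: l ↔ a ∈ l := by
  constructor
  · intro h; exact List.singleton_sublist.mp h.sublist
  · intro h
    obtain ⟨s, t, rfl⟩ := List.append_of_mem h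
    exact ⟨s, t, by simp⟩

-- count.go with a single-character needle counts occurrences
theorem countGo_singleton (l : List Char) : ∀ (fuel acc : Nat), l.length ≤ fuel →
    PySem.Chars.count.go ['0'] fuel l acc = acc + l.count '0' := by
  induction l with
  | nil => intro fuel acc _; cases fuel <;> simp [PySem.Chars.count.go]
  | cons a t ih =>
    intro fuel acc hf
    cases fuel with
    | zero => simp at hf
    | succ f =>
      by_cases ha : a = '0'
      · subst ha
        rw [PySem.Chars.count.go]
        simp only [List.isPrefixOf, beq_self_eq_true, Bool.true_and]
        simp only [List.length_cons] at hf
        simp [ih f (acc + 1) (by omega)]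
        omega
      · rw [PySem.Chars.count.go]
        simp only [List.length_cons] at hf
        have : (['0'] : List Char).isPrefixOf (a :: t) = false := by
          simp [List.isPrefixOf]; exact fun h => (ha h.symm).elim
        simp [this, ih f acc (by omega), ha]

theorem count_singleton_zero (l : List Char) : PySem.Chars.count l ['0'] = l.count '0' := by
  simp [PySem.Chars.count, countGo_singleton l l.length 0 le_rfl]

-- the loop returns true iff some character strictly after position i is not '0'
theorem solutionLoop_iff (cs : List Char) (i : Nat) :
    solutionLoop cs i = true ↔ ∃ c ∈ cs.drop (i + 1), c ≠ '0' := by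
  by_cases h : i < cs.length - 1
  · have hi1 : i + 1 < cs.length := by omega
    rw [solutionLoop]
    have hdrop : cs.drop (i + 1) = cs[i + 1] :: cs.drop (i + 2) := by
      rw [List.drop_eq_getElem_cons hi1]
    have hget : PySem.List.pyGetD cs ((i : Int) + 1) ' ' = cs[i + 1] := by
      have := PySem.List.pyGetD_natCast cs (i + 1) ' '
      push_cast at this
      rw [this, List.getD_eq_getElem?_getD, List.getElem?_eq_getElem hi1]; rfl
    by_cases hc : cs[i + 1] = '0'
    · have : ¬ (PySem.List.pyGetD cs ((i : Int) + 1) ' ' ≠ '0') := by simp [hget, hc]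
      simp only [h, if_true, this, if_false]
      rw [solutionLoop_iff cs (i + 1), hdrop]
      simp [hc]
    · have hcond : (PySem.List.pyGetD cs ((i : Int) + 1) ' ' ≠ '0') = True := by
        simp [hget, hc]
      simp only [h, hcond, if_pos trivial, hdrop]
      simp only [true_iff, List.mem_cons]
      exact ⟨cs[i+1], Or.inl rfl, hc⟩
  · rw [solutionLoop]
    simp only [h, if_false]
    have : cs.length ≤ i + 1 := by omega
    simp [List.drop_eq_nil_of_le this]
termination_by cs.length - 1 - i
decreasing_by omega

-- A-side characterization
def solutionCore (cs : List Char) : Bool :=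
  if PySem.Chars.count cs ['0'] == 0 then false
  else solutionLoop cs (PySem.Chars.find cs ['0']).toNat

theorem solution_eq_core (n : Int) : solution n = solutionCore (PySem.Int.toChars n) := by
  unfold solution solutionCore
  simp only [PySem.Str.count_eq, PySem.Str.find_eq, PySem.Int.toList_toStr]
  rfl

theorem core_iff (cs : List Char) : solutionCore cs = true ↔ HasZeroThenNonzero cs := by
  unfold solutionCore
  by_cases hmem : '0' ∈ cs
  · have hne : (PySem.Chars.count cs ['0'] == 0) = false := by
      simp [count_singleton_zero, List.count_eq_zero, hmem]
    simp only [hne, Bool.false_eq_true, if_false]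
    have hpos : 0 ≤ PySem.Chars.find cs ['0'] :=
      (PySem.Chars.find_nonneg_iff cs ['0']).mpr ((singleton_infix_iff '0' cs).mpr hmem)
    obtain ⟨hpre, hfirst⟩ := PySem.Chars.find_spec (s := cs) (sub := ['0']) hpos
    set idx := (PySem.Chars.find cs ['0']).toNat with hidx
    obtain ⟨t, ht⟩ := hpre
    have hlt : idx < cs.length := by
      by_contra hge
      rw [List.drop_eq_nil_of_le (by omega)] at ht
      simp at ht
    have hget : cs[idx] = '0' := by
      have h2 := List.drop_eq_getElem_cons hlt
      rw [h2] at ht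
      exact (List.cons_eq_cons.mp ht).1.symm
    rw [solutionLoop_iff]
    unfold HasZeroThenNonzero
    constructor
    · rintro ⟨c, hc, hcn⟩
      refine ⟨cs.take (idx + 1), cs.drop (idx + 1), (List.take_append_drop _ _).symm, ?_, c, hc, hcn⟩
      rw [List.take_add_one, List.getElem?_eq_getElem hlt]
      simp [hget]
    · rintro ⟨u, v, huv, hu, c, hc, hcn⟩
      obtain ⟨u₁, t₂, rfl⟩ := List.append_of_mem hu
      have hcs' : cs = u₁ ++ '0' :: (t₂ ++ v) := by simp [huv]
      have hle : idx ≤ u₁.length := by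
        by_contra hgt
        apply hfirst u₁.length (by omega)
        rw [hcs', List.drop_left]
        exact ⟨t₂ ++ v, rfl⟩
      have hlen : idx + 1 ≤ (u₁ ++ '0' :: t₂).length := by
        simp; omega
      refine ⟨c, ?_, hcn⟩
      rw [huv, List.drop_append_of_le_length hlen]
      exact List.mem_append_right _ hc
  · have h0 : (PySem.Chars.count cs ['0'] == 0) = true := by
      simp [count_singleton_zero, List.count_eq_zero, hmem]
    simp only [h0, if_true, Bool.false_eq_true, false_iff]
    rintro ⟨u, v, rfl, hu, -⟩
    exact hmem (List.mem_append_left v hu)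

theorem solution_iff (n : Int) : solution n = true ↔ HasZeroThenNonzero (PySem.Int.toStr n).toList := by
  rw [solution_eq_core, core_iff, PySem.Int.toList_toStr]

-- B-side: membership in dropWhile of the reverse
theorem mem_dropWhile_zero (l : List Char) :
    '0' ∈ l.dropWhile (· == '0') ↔ ∃ u v, l = u ++ v ∧ (∃ c ∈ u, c ≠ '0') ∧ '0' ∈ v := by
  induction l with
  | nil => simp
  | cons a t ih =>
    by_cases ha : a = '0'
    · subst ha
      rw [List.dropWhile_cons_of_pos (by simp)]
      rw [ih]
      constructor
      · rintro ⟨u, v, rfl, hu, hv⟩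
        exact ⟨'0' :: u, v, rfl, by obtain ⟨c, hc, hcn⟩ := hu; exact ⟨c, List.mem_cons_of_mem _ hc, hcn⟩, hv⟩
      · rintro ⟨u, v, huv, hu, hv⟩
        cases u with
        | nil => obtain ⟨c, hc, _⟩ := hu; simp at hc
        | cons b u' =>
          obtain ⟨hb, ht⟩ := by simpa using huv
          subst hb
          obtain ⟨c, hc, hcn⟩ := hu
          rcases List.mem_cons.mp hc with rfl | hc'
          · exact (hcn rfl).elim
          · exact ⟨u', v, ht, ⟨c, hc', hcn⟩, hv⟩
    · rw [List.dropWhile_cons_of_neg (by simp [ha])]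
      constructor
      · intro h
        rcases List.mem_cons.mp h with h0 | ht
        · exact (ha h0.symm).elim
        · exact ⟨[a], t, rfl, ⟨a, List.mem_singleton_self a, ha⟩, ht⟩
      · rintro ⟨u, v, huv, _, hv⟩
        have : '0' ∈ a :: t := huv ▸ List.mem_append_right u hv
        exact this

theorem solution_alt_iff (n : Int) : solution_alt n = true ↔ HasZeroThenNonzero (PySem.Int.toStr n).toList := by
  unfold solution_alt HasZeroThenNonzero
  set l := (PySem.Int.toStr n).toList with hl
  rw [PySem.Chars.isIn_iff_infix, singleton_infix_iff, List.mem_reverse, mem_dropWhile_zero]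
  constructor
  · rintro ⟨u, v, huv, hu, hv⟩
    refine ⟨v.reverse, u.reverse, ?_, by simpa using hv, ?_⟩
    · have := congrArg List.reverse huv
      simp only [List.reverse_reverse, List.reverse_append] at this
      exact this
    · obtain ⟨c, hc, hcn⟩ := hu
      exact ⟨c, by simpa using hc, hcn⟩
  · rintro ⟨u, v, huv, hu, hv⟩
    refine ⟨v.reverse, u.reverse, ?_, ?_, by simpa using hu⟩
    · have := congrArg List.reverse huv
      simp only [List.reverse_reverse, List.reverse_append] at this
      exact this
    · obtain ⟨c, hc, hcn⟩ := hv
      exact ⟨c, by simpa using hc, hcn⟩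

-- ===== VERDICT (by name: the statement is the Claim_ definition above) =====
theorem solution_spec : Claim_equal_solution := by
  intro n _
  unfold Spec_solution
  have hA := solution_iff n
  have hB := solution_alt_iff n
  cases hsa : solution n <;> cases hsb : solution_alt n <;> simp_all
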